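-- pv_equiv track=rewrite | github.com/simply-fire/ABSA-Reviews | test.py | count_sentiment_values
-- ===== SOURCE A (Python) =====
-- from collections import defaultdict
--
-- def count_sentiment_values(array_of_dicts):
--     counts = defaultdict(lambda: {"positive": 0, "negative": 0, "none": 0})
--
--     for dictionary in array_of_dicts:
--         for key, value in dictionary.items():
--             if value == "positive":
--                 counts[key]["positive"] += 1
--             elif value == "negative":
--                 counts[key]["negative"] += 1
--             elif value == "none":
--                 counts[key]["none"] += 1
--     return counts
-- ===== SOURCE B (Python) =====
-- from collections import defaultdict
--
-- def count_sentiment_values(array_of_dicts):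
--     sents = ("positive", "negative", "none")
--     # flat list of all recognized (key, value) pairs
--     pairs = [(k, v) for d in array_of_dicts for k, v in d.items() if v in sents]
--     # keys in order of first recognized occurrence
--     seen = []
--     for k, _ in pairs:
--         if k not in seen:
--             seen.append(k)
--     counts = defaultdict(lambda: {"positive": 0, "negative": 0, "none": 0})
--     for k in seen:
--         counts[k] = {s: pairs.count((k, s)) for s in sents}
--     return counts
-- ===== Notes on version B (the rewrite author's own statement) =====
-- stated objective: alternative
-- what changed: Replaces the fused double loop that increments live nested counters with a flat pipeline: flatten-and-filter the recognized (key,value) pairs, dedup keys in first-occurrence order, then build each key's row by counting pairs directly.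
import Mathlib
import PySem

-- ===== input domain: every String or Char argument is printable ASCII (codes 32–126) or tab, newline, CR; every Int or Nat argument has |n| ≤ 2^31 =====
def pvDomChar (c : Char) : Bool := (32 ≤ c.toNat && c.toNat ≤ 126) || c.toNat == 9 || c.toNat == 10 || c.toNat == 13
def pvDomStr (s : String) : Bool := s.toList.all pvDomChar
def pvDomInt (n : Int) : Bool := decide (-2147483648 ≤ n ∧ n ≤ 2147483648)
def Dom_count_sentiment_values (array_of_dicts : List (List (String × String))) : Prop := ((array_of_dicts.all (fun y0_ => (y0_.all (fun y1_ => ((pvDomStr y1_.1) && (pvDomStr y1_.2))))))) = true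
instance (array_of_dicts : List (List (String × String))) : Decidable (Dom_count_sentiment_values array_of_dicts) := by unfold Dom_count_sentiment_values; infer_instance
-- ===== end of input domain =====

-- B replaces A's fused double loop over live nested counters by a flat pipeline
-- (flatten+filter recognized pairs, dedup keys, count pairs per key); same values, alternative structure.

-- the three recognized sentiment values, in the order A's branches / B's tuple use them
def pvSents : List String := ["positive", "negative", "none"]

-- ===== PORT A =====
-- the defaultdict's factory value {"positive": 0, "negative": 0, "none": 0}
def pvDefault : PySem.Dict String Int := PySem.Dict.mk [("positive", 0), ("negative", 0), ("none", 0)]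

-- counts[key][v] += 1 on the defaultdict: fetch key's dict (the factory value if absent),
-- bump entry v, store back (in place when present, appended when new — PySem.Dict.insert)
def pvBump (counts : PySem.Dict String (PySem.Dict String Int)) (k v : String) :
    PySem.Dict String (PySem.Dict String Int) :=
  let inner := counts.getD k pvDefault
  counts.insert k (inner.insert v (inner.getD v 0 + 1))

def count_sentiment_values (array_of_dicts : List (List (String × String))) :
    List (String × List (String × Int)) :=
  ((array_of_dicts.foldl (fun counts dictionary =>
      dictionary.foldl (fun counts kv =>
        if kv.2 == "positive" then pvBump counts kv.1 "positive"
        else if kv.2 == "negative" then pvBump counts kv.1 "negative"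
        else if kv.2 == "none" then pvBump counts kv.1 "none"
        else counts) counts) PySem.Dict.empty).items).map (fun q => (q.1, q.2.items))

-- ===== PORT B =====
def count_sentiment_values_alt (array_of_dicts : List (List (String × String))) :
    List (String × List (String × Int)) :=
  let pairs := array_of_dicts.flatMap (fun d => d.filter (fun kv => pvSents.contains kv.2))
  let seen := pairs.foldl (fun s kv => PySem.Set.add s kv.1) PySem.Set.empty
  seen.map (fun k => (k, pvSents.map (fun s => (s, (pairs.count (k, s) : Int)))))

-- ===== PRECONDITION & SPEC =====
def Spec_count_sentiment_values (array_of_dicts : List (List (String × String))) (out : List (String × List (String × Int))) : Prop := out = count_sentiment_values_alt array_of_dicts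
instance (array_of_dicts : List (List (String × String))) (out : List (String × List (String × Int))) : Decidable (Spec_count_sentiment_values array_of_dicts out) := by unfold Spec_count_sentiment_values; infer_instance

-- ===== CLAIM (what is proved, stated in full; the proofs are below) =====
def Claim_equal_count_sentiment_values : Prop := ∀ (array_of_dicts : List (List (String × String))), Dom_count_sentiment_values array_of_dicts → Spec_count_sentiment_values array_of_dicts (count_sentiment_values array_of_dicts)

-- ===== LEMMAS AND PROOFS =====

-- the inner counter row for key k after processing the pair list ps
def pvInner (ps : List (String × String)) (k : String) : PySem.Dict String Int :=
  PySem.Dict.mk (pvSents.map (fun s => (s, (ps.count (k, s) : Int))))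

-- the whole counters dict after processing the pair list ps
def pvBuild (ps : List (String × String)) : PySem.Dict String (PySem.Dict String Int) :=
  PySem.Dict.mk ((PySem.Set.ofList (ps.map Prod.fst)).map (fun k => (k, pvInner ps k)))

theorem pv_get?_mk_keymap {ν : Type} (l : List String) (g : String → ν) (k : String)
    (h : l.Nodup) :
    (PySem.Dict.mk (l.map (fun x => (x, g x)))).get? k = if k ∈ l then some (g k) else none := by
  induction l with
  | nil => simp [PySem.Dict.get?]
  | cons x l ih =>
    simp only [List.map_cons, PySem.Dict.get?_mk_cons, List.nodup_cons] at *
    by_cases hx : x = k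
    · simp [hx]
    · have hkx : ¬ k = x := fun h => hx h.symm
      simp [hx, hkx, ih h.2]

theorem pv_getD_mk_keymap {ν : Type} (l : List String) (g : String → ν) (k : String) (d : ν)
    (h : l.Nodup) :
    (PySem.Dict.mk (l.map (fun x => (x, g x)))).getD k d = if k ∈ l then g k else d := by
  rw [PySem.Dict.getD_eq_get?_getD, pv_get?_mk_keymap l g k h]
  by_cases hk : k ∈ l <;> simp [hk]

theorem pv_insert_mk_keymap_of_mem {ν : Type} (l : List String) (g : String → ν) (k : String)
    (w : ν) (h : l.Nodup) (hk : k ∈ l) :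
    (PySem.Dict.mk (l.map (fun x => (x, g x)))).insert k w
      = PySem.Dict.mk (l.map (fun x => (x, if x = k then w else g x))) := by
  apply PySem.Dict.ext
  rw [PySem.Dict.items_insert_of_contains]
  · show (l.map (fun x => (x, g x))).map _ = _
    rw [List.map_map]
    apply List.map_congr_left
    intro x _
    by_cases hx : x = k <;> simp [hx]
  · rw [PySem.Dict.contains_eq_isSome_get?, pv_get?_mk_keymap l g k h]
    simp [hk]

theorem pv_insert_mk_keymap_of_not_mem {ν : Type} (l : List String) (g : String → ν) (k : String)
    (w : ν) (h : l.Nodup) (hk : k ∉ l) :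
    (PySem.Dict.mk (l.map (fun x => (x, g x)))).insert k w
      = PySem.Dict.mk (l.map (fun x => (x, g x)) ++ [(k, w)]) := by
  apply PySem.Dict.ext
  rw [PySem.Dict.items_insert_of_not_contains]
  rw [PySem.Dict.contains_eq_isSome_get?, pv_get?_mk_keymap l g k h]
  simp [hk]

theorem pv_sents_nodup : pvSents.Nodup := by decide

theorem pv_count_append_pair (ps : List (String × String)) (k v x s : String) :
    ((ps ++ [(k, v)]).count (x, s) : Int)
      = (ps.count (x, s) : Int) + if x = k ∧ s = v then 1 else 0 := by
  rw [List.count_append, List.count_singleton]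
  by_cases h : x = k ∧ s = v
  · obtain ⟨h1, h2⟩ := h; subst h1; subst h2; simp
  · have hb : ((k, v) == (x, s)) = false := by
      rw [beq_eq_false_iff_ne]
      intro he; rw [Prod.ext_iff] at he; exact h ⟨he.1.symm, he.2.symm⟩
    simp [hb, h]

theorem pv_inner_append_ne (ps : List (String × String)) (k v x : String) (hx : x ≠ k) :
    pvInner (ps ++ [(k, v)]) x = pvInner ps x := by
  unfold pvInner
  congr 1
  apply List.map_congr_left
  intro s _
  rw [pv_count_append_pair]
  simp [hx]

theorem pv_inner_not_mem (ps : List (String × String)) (k : String)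
    (hk : k ∉ ps.map Prod.fst) : pvInner ps k = pvDefault := by
  unfold pvInner pvDefault
  have h0 : ∀ s, ps.count (k, s) = 0 := by
    intro s
    rw [List.count_eq_zero]
    intro hmem
    exact hk (List.mem_map.mpr ⟨(k, s), hmem, rfl⟩)
  simp [pvSents, h0]

theorem pv_bump_build (ps : List (String × String)) (k v : String) (hv : v ∈ pvSents) :
    pvBump (pvBuild ps) k v = pvBuild (ps ++ [(k, v)]) := by
  have hS : (PySem.Set.ofList (ps.map Prod.fst)).Nodup := PySem.Set.nodup_ofList _
  have hmem : ∀ x, x ∈ PySem.Set.ofList (ps.map Prod.fst) ↔ x ∈ ps.map Prod.fst :=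
    fun x => PySem.Set.mem_ofList (ps.map Prod.fst) x
  -- the fetched inner dict is pvInner ps k in both the present and the absent case
  have hinner : (pvBuild ps).getD k pvDefault = pvInner ps k := by
    unfold pvBuild
    rw [pv_getD_mk_keymap _ _ _ _ hS]
    by_cases hk : k ∈ PySem.Set.ofList (ps.map Prod.fst)
    · simp [hk]
    · simp [hk, pv_inner_not_mem ps k (fun hm => hk ((hmem k).mpr hm))]
  -- the bumped inner dict is the row for ps ++ [(k, v)]
  have hnew : (pvInner ps k).insert v ((pvInner ps k).getD v 0 + 1)
      = pvInner (ps ++ [(k, v)]) k := by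
    unfold pvInner
    rw [pv_getD_mk_keymap _ _ _ _ pv_sents_nodup, if_pos hv,
        pv_insert_mk_keymap_of_mem _ _ _ _ pv_sents_nodup hv]
    congr 1
    apply List.map_congr_left
    intro s _
    rw [pv_count_append_pair]
    by_cases hs : s = v <;> simp [hs]
  show (pvBuild ps).insert k
      (((pvBuild ps).getD k pvDefault).insert v (((pvBuild ps).getD k pvDefault).getD v 0 + 1))
    = pvBuild (ps ++ [(k, v)])
  rw [hinner, hnew]
  have hkeys : (ps ++ [(k, v)]).map Prod.fst = ps.map Prod.fst ++ [k] := by simp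
  by_cases hk : k ∈ PySem.Set.ofList (ps.map Prod.fst)
  · unfold pvBuild
    rw [pv_insert_mk_keymap_of_mem _ _ _ _ hS hk]
    rw [hkeys, PySem.Set.ofList_append_singleton, PySem.Set.add_of_mem hk]
    congr 1
    apply List.map_congr_left
    intro x _
    by_cases hx : x = k
    · simp [hx]
    · simp [hx, pv_inner_append_ne ps k v x hx]
  · unfold pvBuild
    rw [pv_insert_mk_keymap_of_not_mem _ _ _ _ hS hk]
    rw [hkeys, PySem.Set.ofList_append_singleton, PySem.Set.add_of_not_mem hk]
    rw [List.map_append]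
    congr 1
    congr 1
    · apply List.map_congr_left
      intro x hx
      have hxk : x ≠ k := fun h => hk (h ▸ hx)
      simp [pv_inner_append_ne ps k v x hxk]

theorem pv_foldl_bump (ps : List (String × String)) (h : ∀ p ∈ ps, p.2 ∈ pvSents) :
    ps.foldl (fun c (kv : String × String) => pvBump c kv.1 kv.2) PySem.Dict.empty
      = pvBuild ps := by
  induction ps using List.reverseRecOn with
  | nil => rfl
  | append_singleton ps p ih =>
    rw [List.foldl_append]
    have hps : ∀ q ∈ ps, q.2 ∈ pvSents := fun q hq => h q (List.mem_append_left _ hq)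
    rw [ih hps]
    simp only [List.foldl_cons, List.foldl_nil]
    exact pv_bump_build ps p.1 p.2 (h p (List.mem_append_right _ (List.mem_singleton.mpr rfl)))

-- the if/elif chain of A is: bump when the value is recognized, skip otherwise
theorem pv_step_eq (c : PySem.Dict String (PySem.Dict String Int)) (kv : String × String) :
    (if kv.2 == "positive" then pvBump c kv.1 "positive"
     else if kv.2 == "negative" then pvBump c kv.1 "negative"
     else if kv.2 == "none" then pvBump c kv.1 "none"
     else c)
      = if pvSents.contains kv.2 then pvBump c kv.1 kv.2 else c := by
  by_cases h1 : kv.2 = "positive"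
  · simp [h1, pvSents]
  · by_cases h2 : kv.2 = "negative"
    · simp [h2, pvSents]
    · by_cases h3 : kv.2 = "none"
      · simp [h3, pvSents]
      · simp [h1, h2, h3, pvSents]

-- ===== VERDICT (by name: the statement is the Claim_ definition above) =====
theorem count_sentiment_values_spec : Claim_equal_count_sentiment_values := by
  intro ads _
  unfold Spec_count_sentiment_values
  rw [show count_sentiment_values_alt ads
      = ((ads.flatMap (fun d => d.filter (fun kv => pvSents.contains kv.2))).foldl
          (fun s kv => PySem.Set.add s kv.1) PySem.Set.empty).map
          (fun k => (k, pvSents.map (fun s =>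
            (s, ((ads.flatMap (fun d => d.filter (fun kv => pvSents.contains kv.2))).count (k, s) : Int)))))
    from rfl]
  unfold count_sentiment_values
  set pairs := ads.flatMap (fun d => d.filter (fun kv => pvSents.contains kv.2)) with hpairs
  -- A's nested loop is the bump-fold over the flat filtered pair list
  have hA : ads.foldl (fun counts dictionary =>
      dictionary.foldl (fun counts kv =>
        if kv.2 == "positive" then pvBump counts kv.1 "positive"
        else if kv.2 == "negative" then pvBump counts kv.1 "negative"
        else if kv.2 == "none" then pvBump counts kv.1 "none"
        else counts) counts) PySem.Dict.empty
      = pairs.foldl (fun c kv => pvBump c kv.1 kv.2) PySem.Dict.empty := by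
    rw [hpairs, List.foldl_flatMap]
    apply PySem.List.foldl_congr_mem
    intro c d _
    calc d.foldl (fun counts kv =>
            if kv.2 == "positive" then pvBump counts kv.1 "positive"
            else if kv.2 == "negative" then pvBump counts kv.1 "negative"
            else if kv.2 == "none" then pvBump counts kv.1 "none"
            else counts) c
        = d.foldl (fun c kv => if pvSents.contains kv.2 then pvBump c kv.1 kv.2 else c) c := by
          apply PySem.List.foldl_congr_mem
          intro acc kv _
          exact pv_step_eq acc kv
      _ = (d.filter (fun kv => pvSents.contains kv.2)).foldl
            (fun c kv => pvBump c kv.1 kv.2) c := by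
          apply PySem.List.foldl_if_eq_foldl_filter
  rw [hA]
  have hrec : ∀ p ∈ pairs, p.2 ∈ pvSents := by
    intro p hp
    rw [hpairs] at hp
    obtain ⟨d, _, hpd⟩ := List.mem_flatMap.mp hp
    have := (List.mem_filter.mp hpd).2
    simpa using this
  rw [pv_foldl_bump pairs hrec]
  -- both sides are now the key list mapped to its counting rows
  rw [← PySem.Set.update_map_eq_foldl_add, PySem.Set.update_empty]
  unfold pvBuild
  rw [List.map_map]
  apply List.map_congr_left
  intro k _
  simp [pvInner]
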